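-- pv_equiv track=rewrite | github.com/Maicon-g14/Logica-de-Programacao | Sudoku/lab20.py | pos_possiveis
-- ===== SOURCE A (Python) =====
-- def pos_possiveis(tam,linha,coluna,quad,livre):
--     '''Essa recursao dada uma posicao acha possiveis numeros levando em consideracao os numeros da linha,coluna e quadrado 3x3 atual.
--     Cada numero ja existente e removido de uma lista de possibilidades que e retornada depois'''
--     if tam >= 9:        #Se passadas 9 interacoes, percorreu toda linha/coluna/quadrado do sudoku
--         return livre        #Retorna posicoes disponiveis recursao acima
--     else:
--         if linha[tam] != 0:
--             if linha[tam] in livre: livre.remove(linha[tam])        #Na linha remove numero ja existente da lista de possibilidades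
--         if coluna[tam] != 0:
--             if coluna[tam] in livre: livre.remove(coluna[tam])        #Na coluna remove numero ja existente da lista de possibilidades
--         if quad[tam] != 0:
--             if quad[tam] in livre: livre.remove(quad[tam])      #No quadrado remove numero ja existente da lista de possibilidades
--         pos_possiveis(tam+1,linha,coluna,quad,livre)
--         return livre        #Retorna posicoes disponiveis
-- ===== SOURCE B (Python) =====
-- def pos_possiveis(tam, linha, coluna, quad, livre):
--     """Iterative version: walk indices tam..8 once and drop each nonzero
--     number seen in the row, column or 3x3 square from the candidate list."""
--     for i in range(tam, 9):
--         if linha[i] != 0 and linha[i] in livre: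
--             livre.remove(linha[i])
--         if coluna[i] != 0 and coluna[i] in livre:
--             livre.remove(coluna[i])
--         if quad[i] != 0 and quad[i] in livre:
--             livre.remove(quad[i])
--     return livre
-- ===== Notes on version B (the rewrite author's own statement) =====
-- stated objective: simpler
-- what changed: Replaced the self-recursive index-by-index descent with a single flat for-loop over range(tam, 9), removing the recursion and the redundant post-recursion return.
import Mathlib
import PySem

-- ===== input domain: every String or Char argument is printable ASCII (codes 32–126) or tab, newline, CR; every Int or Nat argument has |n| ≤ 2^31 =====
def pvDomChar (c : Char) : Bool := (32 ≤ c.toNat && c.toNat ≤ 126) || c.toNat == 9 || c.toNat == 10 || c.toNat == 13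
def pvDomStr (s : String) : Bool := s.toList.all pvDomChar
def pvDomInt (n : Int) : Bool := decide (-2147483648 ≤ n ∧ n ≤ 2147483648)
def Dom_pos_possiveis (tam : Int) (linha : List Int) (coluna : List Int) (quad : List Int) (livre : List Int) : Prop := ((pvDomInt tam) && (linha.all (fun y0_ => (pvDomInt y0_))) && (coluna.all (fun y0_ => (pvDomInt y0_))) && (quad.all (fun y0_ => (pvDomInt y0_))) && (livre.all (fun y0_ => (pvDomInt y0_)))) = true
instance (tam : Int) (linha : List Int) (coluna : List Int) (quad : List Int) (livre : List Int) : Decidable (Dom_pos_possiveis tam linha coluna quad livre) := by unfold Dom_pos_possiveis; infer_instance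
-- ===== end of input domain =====

-- B replaces A's recursion over tam..8 with one flat loop over range(tam, 9) (simpler; same cost).
-- Both Pythons mutate `livre` in place identically and return it; the proof is about the returned value.

-- ===== PORT A =====
-- `if v != 0: if v in livre: livre.remove(v)` (remove of a present element = erase first occurrence)
def pvRemStepA (livre : List Int) (v? : Option Int) : List Int :=
  match v? with
  | none => livre            -- unreachable inside Pre_ (Python raises IndexError there)
  | some v => if v ≠ 0 then (if v ∈ livre then livre.erase v else livre) else livre

def pos_possiveis (tam : Int) (linha : List Int) (coluna : List Int) (quad : List Int) (livre : List Int) : List Int :=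
  if 9 ≤ tam then livre
  else
    let l1 := pvRemStepA livre (PySem.List.pyGet? linha tam)
    let l2 := pvRemStepA l1 (PySem.List.pyGet? coluna tam)
    let l3 := pvRemStepA l2 (PySem.List.pyGet? quad tam)
    pos_possiveis (tam + 1) linha coluna quad l3
termination_by (9 - tam).toNat
decreasing_by omega

-- ===== PORT B =====
def pos_possiveis_alt (tam : Int) (linha : List Int) (coluna : List Int) (quad : List Int) (livre : List Int) : List Int :=
  (PySem.List.pyRange tam 9 1).foldl (fun acc i =>
    let a1 := match PySem.List.pyGet? linha i with
      | none => acc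
      | some v => if v ≠ 0 ∧ v ∈ acc then acc.erase v else acc
    let a2 := match PySem.List.pyGet? coluna i with
      | none => a1
      | some v => if v ≠ 0 ∧ v ∈ a1 then a1.erase v else a1
    match PySem.List.pyGet? quad i with
      | none => a2
      | some v => if v ≠ 0 ∧ v ∈ a2 then a2.erase v else a2) livre

-- ===== PRECONDITION & SPEC =====
-- Pre_ excludes exactly the inputs where Python A raises IndexError: when tam < 9 it indexes
-- linha/coluna/quad at every i in tam..8, so each list needs length ≥ 9 and tam ≥ -length.
def Pre_pos_possiveis (tam : Int) (linha : List Int) (coluna : List Int) (quad : List Int) (livre : List Int) : Prop :=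
  9 ≤ tam ∨ (9 ≤ (linha.length : Int) ∧ 9 ≤ (coluna.length : Int) ∧ 9 ≤ (quad.length : Int) ∧
             -(linha.length : Int) ≤ tam ∧ -(coluna.length : Int) ≤ tam ∧ -(quad.length : Int) ≤ tam)
instance (tam : Int) (linha : List Int) (coluna : List Int) (quad : List Int) (livre : List Int) : Decidable (Pre_pos_possiveis tam linha coluna quad livre) := by unfold Pre_pos_possiveis; infer_instance

def pvWitness_pos_possiveis : Int × List Int × List Int × List Int × List Int :=
  (0, [1,0,0,0,0,0,0,0,0], [0,0,2,0,0,0,0,0,0], [0,0,0,0,0,0,0,0,5], [1,2,3,4,5,6,7,8,9])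

def Spec_pos_possiveis (tam : Int) (linha : List Int) (coluna : List Int) (quad : List Int) (livre : List Int) (out : List Int) : Prop := out = pos_possiveis_alt tam linha coluna quad livre
instance (tam : Int) (linha : List Int) (coluna : List Int) (quad : List Int) (livre : List Int) (out : List Int) : Decidable (Spec_pos_possiveis tam linha coluna quad livre out) := by unfold Spec_pos_possiveis; infer_instance

-- ===== CLAIM (what is proved, stated in full; the proofs are below) =====
def Claim_equal_pos_possiveis : Prop := ∀ (tam : Int) (linha : List Int) (coluna : List Int) (quad : List Int) (livre : List Int), Dom_pos_possiveis tam linha coluna quad livre → Pre_pos_possiveis tam linha coluna quad livre → Spec_pos_possiveis tam linha coluna quad livre (pos_possiveis tam linha coluna quad livre)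

-- ===== LEMMAS AND PROOFS =====

-- A's nested-if step equals B's conjunction-guarded step.
theorem pvStepEq (xs : List Int) (v? : Option Int) :
    pvRemStepA xs v? = (match v? with
      | none => xs
      | some v => if v ≠ 0 ∧ v ∈ xs then xs.erase v else xs) := by
  cases v? with
  | none => rfl
  | some v => simp only [pvRemStepA]; split_ifs <;> simp_all

-- A's recursion equals B's fold, for every input (the Pre_ hypothesis is not needed:
-- both ports skip an out-of-range index in the same way).
theorem pos_possiveis_eq_alt (linha coluna quad : List Int) :
    ∀ (n : Nat) (tam : Int) (livre : List Int), (9 - tam).toNat = n →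
      pos_possiveis tam linha coluna quad livre = pos_possiveis_alt tam linha coluna quad livre := by
  intro n
  induction n with
  | zero =>
    intro tam livre h
    have h9 : (9 : Int) ≤ tam := by omega
    rw [pos_possiveis, pos_possiveis_alt, PySem.List.pyRange_one_eq_nil h9]
    simp [h9]
  | succ k ih =>
    intro tam livre h
    have hlt : tam < 9 := by omega
    rw [pos_possiveis, pos_possiveis_alt, PySem.List.pyRange_one_cons hlt]
    have h9 : ¬ (9 : Int) ≤ tam := by omega
    simp only [h9, if_false, List.foldl_cons]
    rw [ih (tam + 1) _ (by omega), pos_possiveis_alt]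
    congr 1
    rw [pvStepEq, pvStepEq, pvStepEq]

-- ===== VERDICT (by name: the statement is the Claim_ definition above) =====
theorem pos_possiveis_spec : Claim_equal_pos_possiveis := by
  intro tam linha coluna quad livre _ _
  unfold Spec_pos_possiveis
  exact pos_possiveis_eq_alt linha coluna quad _ tam livre rfl
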